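-- pv_equiv track=rewrite | github.com/gnawre31/CCPS109-109-Python-Problems | labs109.py | duplicate_digit_bonus
-- ===== SOURCE A (Python) =====
-- def duplicate_digit_bonus(n):
--     n = str(n)
--     x = n[0]
--     ctr = 0
--     answer = 0
--     for i in range(1, len(n)):
--         if n[i] == x:
--             ctr += 1
--         else:
--             if ctr > 0:
--                 answer += 10**(ctr - 1)
--                 ctr = 0
--         x = n[i]
--     if ctr > 0:
--         answer += 2 * (10**(ctr - 1))
--     return answer
-- ===== SOURCE B (Python) =====
-- def duplicate_digit_bonus(n):
--     s = str(n)
--     ans = 0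
--     while s:
--         run = 1
--         while run < len(s) and s[run] == s[0]:
--             run += 1
--         rest = s[run:]
--         if run >= 2:
--             ans += (2 if not rest else 1) * 10 ** (run - 2)
--         s = rest
--     return ans
-- ===== Notes on version B (the rewrite author's own statement) =====
-- stated objective: idiomatic
-- what changed: B peels off maximal equal-digit runs (groupby-style) and scores each long-enough run directly from its length, doubling the final run, instead of A's per-character state machine with x/ctr/answer variables.
import Mathlib
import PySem

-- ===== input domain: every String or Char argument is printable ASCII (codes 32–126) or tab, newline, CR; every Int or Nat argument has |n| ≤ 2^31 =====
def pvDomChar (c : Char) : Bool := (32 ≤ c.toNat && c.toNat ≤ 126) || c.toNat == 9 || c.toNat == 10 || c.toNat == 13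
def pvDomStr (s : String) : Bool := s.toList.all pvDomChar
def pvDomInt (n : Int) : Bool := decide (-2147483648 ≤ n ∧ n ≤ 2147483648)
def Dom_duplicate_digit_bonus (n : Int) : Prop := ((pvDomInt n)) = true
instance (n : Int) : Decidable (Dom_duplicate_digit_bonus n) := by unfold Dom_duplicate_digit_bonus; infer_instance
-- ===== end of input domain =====

-- B replaces A's per-character x/ctr/answer state machine by a run-peeling (groupby-style) scan scoring each maximal run directly; objective: more idiomatic, same cost.


-- ===== PORT A =====
-- one loop step: state (x, ctr, answer), next char c
def dupA_step (st : Char × Int × Int) (c : Char) : Char × Int × Int :=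
  let (x, ctr, answer) := st
  if c == x then (c, ctr + 1, answer)
  else if ctr > 0 then (c, 0, answer + 10 ^ (ctr - 1).toNat)   -- 10**(ctr-1): ctr > 0 so exponent is the Nat ctr-1
  else (c, ctr, answer)

-- str(n) is never empty for an int, so the [] branch (where Python's n[0] would raise) is unreachable
def duplicate_digit_bonus (n : Int) : Int :=
  match (PySem.Int.toStr n).toList with
  | [] => 0
  | h :: t =>
    let (_, ctr, answer) := t.foldl dupA_step (h, 0, 0)
    if ctr > 0 then answer + 2 * 10 ^ (ctr - 1).toNat else answer

-- ===== PORT B =====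
-- inner while: number of leading chars of t equal to c (so the run at c :: t has length 1 + countRun c t)
def countRun (c : Char) : List Char → Nat
  | [] => 0
  | d :: t => if d == c then 1 + countRun c t else 0

-- outer while: peel one maximal run, score it, recurse on the rest
def dupB_go (s : List Char) (ans : Int) : Int :=
  match s with
  | [] => ans
  | h :: t =>
    let run := 1 + countRun h t
    let rest := t.drop (countRun h t)
    let ans' := if run ≥ 2 then ans + (if rest = [] then 2 else 1) * 10 ^ (run - 2) else ans
    dupB_go rest ans'
termination_by s.length
decreasing_by simp

def duplicate_digit_bonus_alt (n : Int) : Int :=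
  dupB_go (PySem.Int.toStr n).toList 0

-- ===== PRECONDITION & SPEC =====
def Spec_duplicate_digit_bonus (n : Int) (out : Int) : Prop := out = duplicate_digit_bonus_alt n
instance (n : Int) (out : Int) : Decidable (Spec_duplicate_digit_bonus n out) := by unfold Spec_duplicate_digit_bonus; infer_instance

-- ===== CLAIM (what is proved, stated in full; the proofs are below) =====
def Claim_equal_duplicate_digit_bonus : Prop := ∀ (n : Int), Dom_duplicate_digit_bonus n → Spec_duplicate_digit_bonus n (duplicate_digit_bonus n)

-- ===== LEMMAS AND PROOFS =====

-- A's loop followed by its final bonus, as a function of the remaining tail and current state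
def dupA_fin (t : List Char) (x : Char) (ctr ans : Int) : Int :=
  let (_, c, a) := t.foldl dupA_step (x, ctr, ans)
  if c > 0 then a + 2 * 10 ^ (c - 1).toNat else a

theorem dupB_go_nil (ans : Int) : dupB_go [] ans = ans := by
  unfold dupB_go
  rfl

theorem dupB_go_cons (h : Char) (t : List Char) (ans : Int) :
    dupB_go (h :: t) ans =
      dupB_go (t.drop (countRun h t))
        (if 1 + countRun h t ≥ 2 then
           ans + (if t.drop (countRun h t) = [] then 2 else 1) * 10 ^ (1 + countRun h t - 2)
         else ans) := by
  rw [dupB_go]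

-- main invariant: A's rest-of-loop from state (x, m, ans) equals B finishing the current run
-- (of length m + 1 so far) and then continuing run by run
theorem dupA_fin_eq (t : List Char) (x : Char) (m : Nat) (ans : Int) :
    dupA_fin t x m ans =
      dupB_go (t.drop (countRun x t))
        (if m + 1 + countRun x t ≥ 2 then
           ans + (if t.drop (countRun x t) = [] then 2 else 1) * 10 ^ (m + 1 + countRun x t - 2)
         else ans) := by
  induction t generalizing x m ans with
  | nil =>
    simp only [dupA_fin, countRun, List.foldl, List.drop_nil, dupB_go_nil]
    rcases Nat.eq_zero_or_pos m with hm | hm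
    · subst hm; norm_num
    · have h1 : (0:Int) < (m:Int) := by exact_mod_cast hm
      have h2 : m + 1 + 0 ≥ 2 := by omega
      have h3 : ((m:Int) - 1).toNat = m + 1 + 0 - 2 := by omega
      simp only [h1, if_pos, h2, h3]
  | cons c t ih =>
    by_cases hc : c = x
    · subst hc
      have hstep : dupA_fin (c :: t) c m ans = dupA_fin t c ((m + 1 : Nat)) ans := by
        simp only [dupA_fin, List.foldl_cons, dupA_step, beq_self_eq_true, if_true]
        push_cast
        ring_nf
      rw [hstep, ih]
      simp only [countRun, beq_self_eq_true, if_true]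
      rw [show (1 + countRun c t) = countRun c t + 1 from by omega, List.drop_succ_cons,
        show m + 1 + (countRun c t + 1) = m + 1 + 1 + countRun c t from by omega]
    · have hne : (c == x) = false := by simp [hc]
      have hst : dupA_step (x, (m:Int), ans) c =
          (c, ((0:Nat):Int), if (m:Int) > 0 then ans + 10 ^ ((m:Int) - 1).toNat else ans) := by
        simp only [dupA_step, hne, Bool.false_eq_true, if_false]
        split_ifs with h
        · simp
        · have hm0 : m = 0 := by omega
          subst hm0; simp
      have hstep : dupA_fin (c :: t) x m ans =
          dupA_fin t c ((0:Nat)) (if (m:Int) > 0 then ans + 10 ^ ((m:Int) - 1).toNat else ans) := by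
        simp only [dupA_fin, List.foldl_cons, hst]
      rw [hstep, ih]
      have hk : countRun x (c :: t) = 0 := by simp [countRun, hne]
      rw [hk]
      simp only [List.drop_zero, Nat.zero_add, Nat.add_zero]
      rw [dupB_go_cons]
      have hans : (if (↑m:Int) > 0 then ans + 10 ^ (((↑m:Int)) - 1).toNat else ans)
          = (if m + 1 ≥ 2 then ans + (if (c :: t : List Char) = [] then 2 else 1) * 10 ^ (m + 1 - 2) else ans) := by
        by_cases hm : m = 0
        · subst hm; norm_num
        · have h1 : (0:Int) < (m:Int) := by exact_mod_cast Nat.pos_of_ne_zero hm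
          have h3 : ((m:Int) - 1).toNat = m + 1 - 2 := by omega
          rw [if_pos h1, if_pos (by omega : m + 1 ≥ 2), h3]
          simp
      rw [hans]
      rfl

-- ===== VERDICT (by name: the statement is the Claim_ definition above) =====
theorem duplicate_digit_bonus_spec : Claim_equal_duplicate_digit_bonus := by
  intro n _
  show duplicate_digit_bonus n = duplicate_digit_bonus_alt n
  unfold duplicate_digit_bonus duplicate_digit_bonus_alt
  cases hs : (PySem.Int.toStr n).toList with
  | nil => rw [dupB_go_nil]
  | cons h t =>
    have hmain := dupA_fin_eq t h 0 0
    simp only [Nat.cast_zero, Nat.zero_add] at hmain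
    simp only [dupA_fin] at hmain
    rw [dupB_go_cons]
    exact hmain
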